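-- pv_equiv track=rewrite | github.com/shbgreenery/ShowPage | nonogram_app/solver.py | _str2arr
-- ===== SOURCE A (Python) =====
-- from typing import List, Set
--
-- def _str2arr(s: str) -> List[int]:
--     """将二进制字符串转换为数组"""
--     tmp = []
--     for i, c in enumerate(s):
--         if c == '1':
--             if i == 0 or s[i - 1] == '0':
--                 tmp.append(1)
--             else:
--                 tmp[-1] += 1
--     return tmp
-- ===== SOURCE B (Python) =====
-- from typing import List
--
-- def _str2arr(s: str) -> List[int]:
--     """将二进制字符串转换为数组"""
--     ones = [i for i, c in enumerate(s) if c == '1']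
--     starts = [k for k, i in enumerate(ones) if i == 0 or s[i - 1] == '0']
--     ends = starts[1:] + [len(ones)]
--     return [b - a for a, b in zip(starts, ends)]
-- ===== Notes on version B (the rewrite author's own statement) =====
-- stated objective: alternative
-- what changed: B replaces A's running accumulator with in-place mutation of the last element by a three-stage pipeline: collect the positions of '1's, pick the ranks where a new group starts (index 0 or preceded by '0'), and return differences of consecutive start ranks.
import Mathlib
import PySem

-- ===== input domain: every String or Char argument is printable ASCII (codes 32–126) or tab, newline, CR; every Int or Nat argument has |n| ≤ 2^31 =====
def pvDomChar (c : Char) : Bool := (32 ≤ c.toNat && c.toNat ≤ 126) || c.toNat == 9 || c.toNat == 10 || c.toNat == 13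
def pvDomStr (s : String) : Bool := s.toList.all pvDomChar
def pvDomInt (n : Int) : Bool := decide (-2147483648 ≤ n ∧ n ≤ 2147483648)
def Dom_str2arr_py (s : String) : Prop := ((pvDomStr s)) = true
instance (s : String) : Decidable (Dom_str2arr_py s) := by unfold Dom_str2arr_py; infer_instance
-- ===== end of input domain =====

-- B computes the run-lengths via positions of '1's, group-start ranks and rank differences
-- instead of A's accumulator with last-element mutation; same O(n) cost, return values equal
-- on every input where A returns (A raises IndexError on the inputs Pre_ excludes).

-- ===== PORT A =====
-- A's loop body: tmp?.bind models the possible IndexError of tmp[-1] on an empty tmp.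
def stepA (cs : List Char) (tmp? : Option (List Int)) (ic : Int × Char) : Option (List Int) :=
  tmp?.bind fun tmp =>
    if ic.2 = '1' then
      if ic.1 = 0 ∨ PySem.List.pyGet? cs (ic.1 - 1) = some '0' then some (tmp ++ [(1 : Int)])
      else
        match tmp with
        | [] => none  -- tmp[-1] += 1 on empty tmp: IndexError
        | _ :: _ => some (tmp.dropLast ++ [tmp.getLastD 0 + 1])
    else some tmp

def str2arr_py (s : String) : List Int :=
  (((PySem.List.enumerate s.toList 0).foldl (stepA s.toList) (some [])).getD [])

-- ===== PORT B =====
def str2arr_py_alt (s : String) : List Int :=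
  let cs := s.toList
  let ones := ((PySem.List.enumerate cs 0).filter (fun ic => decide (ic.2 = '1'))).map (·.1)
  let starts := ((PySem.List.enumerate ones 0).filter
      (fun ki => decide (ki.2 = 0 ∨ PySem.List.pyGet? cs (ki.2 - 1) = some '0'))).map (·.1)
  let ends := starts.drop 1 ++ [(ones.length : Int)]
  (starts.zip ends).map (fun ab => ab.2 - ab.1)

-- ===== PRECONDITION & SPEC =====
-- freshOK prev cs: the first '1' of cs (if any) is preceded by '0' (prev is the char before cs;
-- the virtual prev '0' covers index 0).
def freshOK : Char → List Char → Bool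
  | _, [] => true
  | prev, c :: cs => if c = '1' then decide (prev = '0') else freshOK c cs

-- Pre_ : the first '1' of s, if any, is at index 0 or preceded by '0' — exactly the inputs on
-- which A returns; on all others A raises IndexError (tmp[-1] with tmp still empty).
def Pre_str2arr_py (s : String) : Prop := freshOK '0' s.toList = true
instance (s : String) : Decidable (Pre_str2arr_py s) := by unfold Pre_str2arr_py; infer_instance

def pvWitness_str2arr_py : String := "0110 101"

def Spec_str2arr_py (s : String) (out : List Int) : Prop := out = str2arr_py_alt s
instance (s : String) (out : List Int) : Decidable (Spec_str2arr_py s out) := by unfold Spec_str2arr_py; infer_instance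

-- ===== CLAIM (what is proved, stated in full; the proofs are below) =====
def Claim_equal_str2arr_py : Prop := ∀ (s : String), Dom_str2arr_py s → Pre_str2arr_py s → Spec_str2arr_py s (str2arr_py s)

-- ===== LEMMAS AND PROOFS =====

-- A's loop rephrased on chars with the previous character threaded through.
def loopA : List Char → Char → Option (List Int) → Option (List Int)
  | [], _, t => t
  | c :: cs, prev, t =>
    loopA cs c (t.bind fun tmp =>
      if c = '1' then
        if prev = '0' then some (tmp ++ [(1 : Int)])
        else
          match tmp with
          | [] => none
          | _ :: _ => some (tmp.dropLast ++ [tmp.getLastD 0 + 1])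
      else some tmp)

-- canonical result: K cs prev k, k = size of the currently open group (0 = none open)
def K : List Char → Char → Int → List Int
  | [], _, k => if k = 0 then [] else [k]
  | c :: cs, prev, k =>
    if c = '1' then
      if prev = '0' then (if k = 0 then [] else [k]) ++ K cs c 1
      else K cs c (k + 1)
    else K cs c k

-- positions of '1's, counting from n
def onesF : List Char → Int → List Int
  | [], _ => []
  | c :: cs, n => if c = '1' then n :: onesF cs (n + 1) else onesF cs (n + 1)

-- ranks (among the '1's) at which a new group starts, counting from r
def SR : List Char → Char → Int → List Int
  | [], _, _ => []
  | c :: cs, prev, r =>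
    if c = '1' then (if prev = '0' then r :: SR cs c (r + 1) else SR cs c (r + 1))
    else SR cs c r

def cnt1 : List Char → Int
  | [] => 0
  | c :: cs => (if c = '1' then 1 else 0) + cnt1 cs

def dif (starts : List Int) (total : Int) : List Int :=
  (starts.zip (starts.drop 1 ++ [total])).map (fun ab => ab.2 - ab.1)

theorem dropLast_getLastD {l : List Int} (h : l ≠ []) : l.dropLast ++ [l.getLastD 0] = l := by
  rw [List.getLastD_eq_getLast?, List.getLast?_eq_some_getLast h, Option.getD_some]
  exact List.dropLast_append_getLast h

theorem prevBridge (pre cs : List Char) :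
    ((pre.length : Int) = 0 ∨ PySem.List.pyGet? (pre ++ cs) ((pre.length : Int) - 1) = some '0')
      ↔ pre.getLastD '0' = '0' := by
  rcases pre.eq_nil_or_concat with h | ⟨ys, y, h⟩
  · subst h; simp
  · subst h
    rw [List.concat_eq_append] at *
    have hlen : (((ys ++ [y]).length : Int)) = (ys.length : Int) + 1 := by
      simp
    have hget : PySem.List.pyGet? ((ys ++ [y]) ++ cs) (((ys ++ [y]).length : Int) - 1)
        = some y := by
      rw [hlen]
      have : (ys.length : Int) + 1 - 1 = (ys.length : Int) := by ring
      rw [this, List.append_assoc]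
      simp
    rw [hget, hlen]
    constructor
    · rintro (h | h)
      · omega
      · simpa [List.getLastD_concat] using h
    · intro h
      right
      simpa [List.getLastD_concat] using h

theorem A_bridge (cs : List Char) : ∀ (pre : List Char) (t : Option (List Int)),
    (PySem.List.enumerate cs (pre.length : Int)).foldl (stepA (pre ++ cs)) t
      = loopA cs (pre.getLastD '0') t := by
  induction cs with
  | nil => intro pre t; simp [PySem.List.enumerate_nil, loopA]
  | cons c cs ih =>
    intro pre t
    rw [PySem.List.enumerate_cons, List.foldl_cons]
    have hstep : stepA (pre ++ c :: cs) t ((pre.length : Int), c)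
        = t.bind (fun tmp =>
            if c = '1' then
              if pre.getLastD '0' = '0' then some (tmp ++ [(1 : Int)])
              else
                match tmp with
                | [] => none
                | _ :: _ => some (tmp.dropLast ++ [tmp.getLastD 0 + 1])
            else some tmp) := by
      unfold stepA
      by_cases hp : pre.getLastD '0' = '0'
      · have hd := (prevBridge pre (c :: cs)).mpr hp
        simp only [hp, if_pos hd, if_true]
      · have hd : ¬ (((pre.length : Int)) = 0 ∨
            PySem.List.pyGet? (pre ++ c :: cs) ((pre.length : Int) - 1) = some '0') :=
          fun h => hp ((prevBridge pre (c :: cs)).mp h)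
        simp only [hp, if_neg hd, if_false]
    rw [hstep, loopA]
    have h2 := ih (pre ++ [c]) (t.bind (fun tmp =>
            if c = '1' then
              if pre.getLastD '0' = '0' then some (tmp ++ [(1 : Int)])
              else
                match tmp with
                | [] => none
                | _ :: _ => some (tmp.dropLast ++ [tmp.getLastD 0 + 1])
            else some tmp))
    rw [show ((pre ++ [c]).length : Int) = (pre.length : Int) + 1 by simp,
        show (pre ++ [c]) ++ cs = pre ++ c :: cs by simp,
        show (pre ++ [c]).getLastD '0' = c by
          rw [← List.concat_eq_append]; simp] at h2
    exact h2

theorem LemA (cs : List Char) : ∀ (prev : Char) (tmp : List Int),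
    (tmp = [] → freshOK prev cs = true) → (tmp ≠ [] → 0 < tmp.getLastD 0) →
    loopA cs prev (some tmp) = some (tmp.dropLast ++ K cs prev (tmp.getLastD 0)) := by
  induction cs with
  | nil =>
    intro prev tmp h1 h2
    cases tmp with
    | nil => simp [loopA, K]
    | cons a l =>
      have hpos := h2 (by simp)
      rw [loopA, K, if_neg (by omega)]
      rw [dropLast_getLastD (by simp)]
  | cons c cs ih =>
    intro prev tmp h1 h2
    by_cases hc : c = '1'
    · subst hc
      by_cases hp : prev = '0'
      · rw [loopA]
        simp only [Option.bind_some, if_pos hp, reduceIte]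
        rw [ih '1' (tmp ++ [1]) (by simp) (by simp)]
        rw [K, if_pos rfl, if_pos hp]
        cases tmp with
        | nil => simp
        | cons a l =>
          have hpos := h2 (by simp)
          rw [if_neg (by omega)]
          simp only [List.dropLast_concat, List.getLastD_concat]
          rw [← List.append_assoc, dropLast_getLastD (by simp)]
      · cases tmp with
        | nil =>
          exact absurd (h1 rfl) (by simp [freshOK, hp])
        | cons a l =>
          rw [loopA]
          simp only [Option.bind_some, if_neg hp, reduceIte]
          have hpos := h2 (by simp)
          rw [ih '1' ((a :: l).dropLast ++ [(a :: l).getLastD 0 + 1]) (by simp)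
                (by intro _; rw [List.getLastD_concat]; omega)]
          rw [K, if_pos rfl, if_neg hp]
          simp only [List.dropLast_concat, List.getLastD_concat]
    · rw [loopA]
      simp only [Option.bind_some, if_neg hc]
      rw [ih c tmp (fun he => by
            have := h1 he
            rwa [freshOK, if_neg hc] at this) h2]
      rw [K, if_neg hc]

theorem O1 (cs : List Char) : ∀ (n : Int),
    ((PySem.List.enumerate cs n).filter (fun ic => decide (ic.2 = '1'))).map (·.1) = onesF cs n := by
  induction cs with
  | nil => intro n; simp [PySem.List.enumerate_nil, onesF]
  | cons c cs ih =>
    intro n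
    rw [PySem.List.enumerate_cons, onesF]
    by_cases hc : c = '1'
    · simp [hc, ih]
    · simp [hc, ih]

theorem O2 (cs : List Char) : ∀ (n : Int), ((onesF cs n).length : Int) = cnt1 cs := by
  induction cs with
  | nil => intro n; simp [onesF, cnt1]
  | cons c cs ih =>
    intro n
    rw [onesF, cnt1]
    by_cases hc : c = '1'
    · simp [hc, ih]; ring
    · simp [hc, ih]

theorem S_bridge (full : List Char) : ∀ (cs pre : List Char) (n r : Int),
    full = pre ++ cs → n = (pre.length : Int) →
    ((PySem.List.enumerate (onesF cs n) r).filter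
        (fun ki => decide (ki.2 = 0 ∨ PySem.List.pyGet? full (ki.2 - 1) = some '0'))).map (·.1)
      = SR cs (pre.getLastD '0') r := by
  intro cs
  induction cs with
  | nil => intro pre n r _ _; simp [onesF, SR, PySem.List.enumerate_nil]
  | cons c cs ih =>
    intro pre n r hfull hn
    have hfull' : full = (pre ++ [c]) ++ cs := by simp [hfull]
    have hn' : n + 1 = ((pre ++ [c]).length : Int) := by simp [hn]
    have hlast : (pre ++ [c]).getLastD '0' = c := by
      rw [← List.concat_eq_append]; simp
    have h2 := ih (pre ++ [c]) (n + 1) (r + 1) hfull' hn'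
    have h2' := ih (pre ++ [c]) (n + 1) r hfull' hn'
    rw [hlast] at h2 h2'
    by_cases hc : c = '1'
    · subst hc
      rw [onesF, if_pos rfl, PySem.List.enumerate_cons, List.filter_cons]
      by_cases hp : pre.getLastD '0' = '0'
      · have hd : ((r, n).2 = 0 ∨ PySem.List.pyGet? full ((r, n).2 - 1) = some '0') := by
          rw [hfull, hn]; exact (prevBridge pre ('1' :: cs)).mpr hp
        rw [SR, if_pos rfl, if_pos hp]
        simp only [decide_eq_true_eq, hd, reduceIte]
        rw [List.map_cons, h2]
      · have hd : ¬ ((r, n).2 = 0 ∨ PySem.List.pyGet? full ((r, n).2 - 1) = some '0') := by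
          rw [hfull, hn]; exact fun h => hp ((prevBridge pre ('1' :: cs)).mp h)
        rw [SR, if_pos rfl, if_neg hp]
        simp only [decide_eq_true_eq, hd, reduceIte]
        exact h2
    · rw [onesF, if_neg hc, SR, if_neg hc]
      exact h2'

theorem dif_cons2 (a b : Int) (l : List Int) (t : Int) :
    dif (a :: b :: l) t = (b - a) :: dif (b :: l) t := by
  simp [dif]

theorem LemB2 (cs : List Char) : ∀ (prev : Char) (r k : Int), 0 ≤ k → k ≤ r →
    (k = 0 → freshOK prev cs = true) →
    dif ((if k = 0 then [] else [r - k]) ++ SR cs prev r) (r + cnt1 cs) = K cs prev k := by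
  induction cs with
  | nil =>
    intro prev r k hk0 hkr _
    rw [SR, K, cnt1]
    by_cases hk : k = 0
    · simp [hk, dif]
    · rw [if_neg hk, if_neg hk]
      simp [dif]
  | cons c cs ih =>
    intro prev r k hk0 hkr hfresh
    by_cases hc : c = '1'
    · subst hc
      rw [SR, if_pos rfl, K, if_pos rfl, cnt1, if_pos rfl]
      by_cases hp : prev = '0'
      · rw [if_pos hp, if_pos hp]
        have h2 := ih '1' (r + 1) 1 (by omega) (by omega) (by omega)
        rw [if_neg (by omega)] at h2
        have hr1 : r + 1 - 1 = r := by ring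
        rw [hr1, List.singleton_append] at h2
        have htot : r + (1 + cnt1 cs) = (r + 1) + cnt1 cs := by ring
        rw [htot]
        by_cases hk : k = 0
        · rw [if_pos hk, if_pos hk, List.nil_append, List.nil_append, h2]
        · rw [if_neg hk, if_neg hk, List.singleton_append, List.singleton_append,
              dif_cons2, h2]
          congr 1
          ring
      · rw [if_neg hp, if_neg hp]
        by_cases hk : k = 0
        · exact absurd (hfresh hk) (by simp [freshOK, hp])
        · have h2 := ih '1' (r + 1) (k + 1) (by omega) (by omega) (by omega)
          rw [if_neg (by omega)] at h2
          have he : r + 1 - (k + 1) = r - k := by ring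
          rw [he] at h2
          have htot : r + (1 + cnt1 cs) = (r + 1) + cnt1 cs := by ring
          rw [htot, if_neg hk]
          exact h2
    · rw [SR, if_neg hc, K, if_neg hc, cnt1, if_neg hc]
      have htot : r + (0 + cnt1 cs) = r + cnt1 cs := by ring
      rw [htot]
      exact ih c r k hk0 hkr (fun hk => by
        have := hfresh hk
        rwa [freshOK, if_neg hc] at this)

-- ===== VERDICT (by name: the statement is the Claim_ definition above) =====
theorem str2arr_py_spec : Claim_equal_str2arr_py := by
  intro s _ hpre
  unfold Spec_str2arr_py str2arr_py str2arr_py_alt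
  simp only []
  have hA := A_bridge s.toList [] (some [])
  simp only [List.nil_append, List.length_nil, Nat.cast_zero, List.getLastD_nil] at hA
  rw [hA, LemA s.toList '0' [] (fun _ => hpre) (by simp)]
  simp only [List.dropLast_nil, List.getLastD_nil, List.nil_append, Option.getD_some]
  have hS := S_bridge s.toList s.toList [] 0 0 (by simp) (by simp)
  rw [List.getLastD_nil] at hS
  rw [O1 s.toList 0]
  rw [O2 s.toList 0]
  rw [hS]
  have hB := LemB2 s.toList '0' 0 0 le_rfl le_rfl (fun _ => hpre)
  rw [if_pos rfl, List.nil_append,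
      show (0 : Int) + cnt1 s.toList = cnt1 s.toList by ring] at hB
  rw [← hB]
  rfl
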